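-- pv_equiv track=rewrite | github.com/sahithivadla/cp- | 03-kth_occurrences-Python/kth_occurrences.py | fun_kth_occurrences
-- ===== SOURCE A (Python) =====
-- def fun_kth_occurrences(s, n):
-- 	d ={}
-- 	for i in s:
-- 		if i in d:
-- 			d[i] =d[i]+1
-- 		else:
-- 			d[i]=1
-- 	s= {k: v for k, v in sorted(d.items(), key=lambda item: item[1] ,reverse=True)}
-- 	lit = []
-- 	for key in s.keys():
-- 	    lit.append(key)
--
-- 	return(lit[n-1])
-- ===== SOURCE B (Python) =====
-- def fun_kth_occurrences(s, n):
--     d = {}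
--     for ch in s:
--         if ch in d:
--             d[ch] = d[ch] + 1
--         else:
--             d[ch] = 1
--     lit = []
--     if d:
--         m = max(d.values())
--         for c in range(m, 0, -1):
--             for k, v in d.items():
--                 if v == c:
--                     lit.append(k)
--     return lit[n - 1]
-- ===== Notes on version B (the rewrite author's own statement) =====
-- stated objective: alternative
-- what changed: B replaces A's stable reverse sort of the frequency-dict items (and the rebuilt dict) by a bucket/counting pass: it finds the maximum count and, for each count from the maximum down to 1, appends in insertion order every character with that count.
-- outside the precondition, e.g. on fun_kth_occurrences('ab', 5): A raises IndexError, B raises IndexError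
import Mathlib
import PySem

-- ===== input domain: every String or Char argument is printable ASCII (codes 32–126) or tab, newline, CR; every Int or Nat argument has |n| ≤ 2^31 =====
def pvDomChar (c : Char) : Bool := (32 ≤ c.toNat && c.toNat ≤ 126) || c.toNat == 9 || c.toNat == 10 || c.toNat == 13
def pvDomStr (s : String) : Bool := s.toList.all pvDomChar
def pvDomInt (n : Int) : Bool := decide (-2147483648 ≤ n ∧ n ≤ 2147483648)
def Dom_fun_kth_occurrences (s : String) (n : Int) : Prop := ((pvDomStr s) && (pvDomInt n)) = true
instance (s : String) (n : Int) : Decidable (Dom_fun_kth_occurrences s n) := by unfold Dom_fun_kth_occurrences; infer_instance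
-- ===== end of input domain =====

-- B replaces A's sort-by-count (stable reverse sort of the dict items) by a bucket/counting pass
-- from the maximum count downwards over the insertion-ordered frequency dict (objective: alternative).


-- ===== PORT A =====
def fun_kth_occurrences (s : String) (n : Int) : String :=
  let d : PySem.Dict Char Int := s.toList.foldl
    (fun d i => if d.contains i then d.insert i (d.getD i 0 + 1) else d.insert i 1)
    PySem.Dict.empty
  let s2 : PySem.Dict Char Int :=
    (PySem.List.sorted d.items (fun item => item.2) true).foldl
      (fun acc kv => acc.insert kv.1 kv.2) PySem.Dict.empty
  let lit : List Char := s2.keys.foldl (fun lit key => lit ++ [key]) []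
  ((PySem.List.pyGet? lit (n - 1)).map (fun c => String.ofList [c])).getD ""

-- ===== PORT B =====
def fun_kth_occurrences_alt (s : String) (n : Int) : String :=
  let d : PySem.Dict Char Int := s.toList.foldl
    (fun d ch => if d.contains ch then d.insert ch (d.getD ch 0 + 1) else d.insert ch 1)
    PySem.Dict.empty
  let lit : List Char :=
    match PySem.List.max? d.values (fun v => v) with
    | none => []
    | some m =>
        (PySem.List.pyRange m 0 (-1)).foldl
          (fun lit c => d.items.foldl (fun lit kv => if kv.2 == c then lit ++ [kv.1] else lit) lit) []
  ((PySem.List.pyGet? lit (n - 1)).map (fun c => String.ofList [c])).getD ""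

-- ===== PRECONDITION & SPEC =====
-- Pre_ excludes exactly the inputs where Python A raises IndexError: lit[n-1] with the
-- (Python-signed) index n-1 out of range of the list of distinct characters of s.
def Pre_fun_kth_occurrences (s : String) (n : Int) : Prop :=
  PySem.Raise.InRange (PySem.Set.ofList s.toList).length (n - 1)
instance (s : String) (n : Int) : Decidable (Pre_fun_kth_occurrences s n) := by
  unfold Pre_fun_kth_occurrences; infer_instance
def pvWitness_fun_kth_occurrences : String × Int := ("aab", 1)

def Spec_fun_kth_occurrences (s : String) (n : Int) (out : String) : Prop := out = fun_kth_occurrences_alt s n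
instance (s : String) (n : Int) (out : String) : Decidable (Spec_fun_kth_occurrences s n out) := by unfold Spec_fun_kth_occurrences; infer_instance

-- ===== CLAIM (what is proved, stated in full; the proofs are below) =====
def Claim_equal_fun_kth_occurrences : Prop := ∀ (s : String) (n : Int), Dom_fun_kth_occurrences s n → Pre_fun_kth_occurrences s n → Spec_fun_kth_occurrences s n (fun_kth_occurrences s n)

-- ===== LEMMAS AND PROOFS =====

-- [m, m-1, …, 1] as a structural list (proof-side view of range(m, 0, -1))
def pvDesc : Nat → List Int
  | 0 => []
  | j + 1 => ((j : Int) + 1) :: pvDesc j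

theorem pvMem_desc {c : Int} {j : Nat} : c ∈ pvDesc j ↔ 1 ≤ c ∧ c ≤ (j : Int) := by
  induction j with
  | zero => simp [pvDesc]; omega
  | succ j ih =>
    simp only [pvDesc, List.mem_cons, ih]
    constructor
    · rintro (rfl | ⟨h1, h2⟩) <;> push_cast <;> omega
    · rintro ⟨h1, h2⟩
      push_cast at h2
      by_cases hc : c = (j : Int) + 1
      · exact Or.inl hc
      · exact Or.inr ⟨h1, by omega⟩

theorem pvRange_eq_desc (m : Int) (h : 0 ≤ m) :
    PySem.List.pyRange m 0 (-1) = pvDesc m.toNat := by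
  obtain ⟨j, rfl⟩ : ∃ j : Nat, m = (j : Int) := ⟨m.toNat, (Int.toNat_of_nonneg h).symm⟩
  have hlen : ∀ i : Nat, (pvDesc i).length = i := by
    intro i; induction i with
    | zero => rfl
    | succ i ih => simp [pvDesc, ih]
  have hget : ∀ (i p : Nat) (hp : p < i) (hp' : p < (pvDesc i).length),
      (pvDesc i)[p] = (i : Int) - (p : Int) := by
    intro i
    induction i with
    | zero => intro p hp; omega
    | succ i ih =>
      intro p hp hp'
      match p with
      | 0 => simp [pvDesc]
      | q + 1 =>
        have hq : q < i := by omega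
        simp only [pvDesc, List.getElem_cons_succ]
        rw [ih q hq (by rw [hlen]; exact hq)]
        push_cast; ring
  have aux : ∀ i : Nat, (List.range i).map (fun k : Nat => ((i : Int)) + -(k : Int)) = pvDesc i := by
    intro i
    apply List.ext_getElem
    · simp [hlen]
    · intro p hp1 hp2
      have hpi : p < i := by simpa using hp1
      rw [hget i p hpi hp2]
      simp only [List.getElem_map, List.getElem_range]
      ring
  by_cases hj : j = 0
  · subst hj
    simp [PySem.List.pyRange, pvDesc]
  · simp only [PySem.List.pyRange]
    norm_num
    rw [if_pos (Nat.pos_of_ne_zero hj)]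
    simpa using aux j

theorem pvInsertBy_passthrough {α : Type} (before : α → α → Bool) (x : α) (l rest : List α)
    (h : ∀ y ∈ l, before x y = false) :
    PySem.List.insertBy before x (l ++ rest) = l ++ PySem.List.insertBy before x rest := by
  induction l with
  | nil => simp
  | cons y t ih =>
    have hy : before x y = false := h y (by simp)
    simp only [List.cons_append, PySem.List.insertBy, hy]
    simp only [Bool.false_eq_true, if_false]
    rw [ih (fun z hz => h z (by simp [hz]))]

theorem pvInsertBy_front {α : Type} (before : α → α → Bool) (x : α) (rest : List α)
    (h : ∀ y ∈ rest, before x y = true) :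
    PySem.List.insertBy before x rest = x :: rest := by
  cases rest with
  | nil => rfl
  | cons y t => simp [PySem.List.insertBy, h y (by simp)]

theorem pvIns (x : Char × Int) (j : Nat) (l : List (Char × Int))
    (h1 : 1 ≤ x.2) (h2 : x.2 ≤ (j : Int)) :
    PySem.List.insertBy (fun a b => decide (b.2 < a.2)) x
        ((pvDesc j).flatMap (fun c => l.filter (fun p => p.2 == c)))
      = (pvDesc j).flatMap (fun c => (l ++ [x]).filter (fun p => p.2 == c)) := by
  induction j with
  | zero => exact absurd h2 (by push_cast; omega)
  | succ j ih =>
    simp only [pvDesc, List.flatMap_cons]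
    have hmemF : ∀ c : Int, ∀ y ∈ l.filter (fun p => p.2 == c), y.2 = c := by
      intro c y hy
      have := List.of_mem_filter hy
      simpa using this
    have hrest : ∀ y ∈ (pvDesc j).flatMap (fun c => l.filter (fun p => p.2 == c)),
        1 ≤ y.2 ∧ y.2 ≤ (j : Int) := by
      intro y hy
      rcases List.mem_flatMap.mp hy with ⟨c, hc, hyc⟩
      have := hmemF c y hyc
      have hcb := pvMem_desc.mp hc
      omega
    have hpass : ∀ y ∈ l.filter (fun p => p.2 == ((j : Int) + 1)),
        (fun a b => decide (b.2 < a.2)) x y = false := by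
      intro y hy
      have := hmemF ((j : Int) + 1) y hy
      simp only [decide_eq_false_iff_not, not_lt]
      omega
    rw [pvInsertBy_passthrough _ _ _ _ hpass]
    by_cases hx : x.2 = (j : Int) + 1
    · have hfront : ∀ y ∈ (pvDesc j).flatMap (fun c => l.filter (fun p => p.2 == c)),
          (fun a b => decide (b.2 < a.2)) x y = true := by
        intro y hy
        have := hrest y hy
        simp only [decide_eq_true_eq]
        omega
      rw [pvInsertBy_front _ _ _ hfront]
      have htop : (l ++ [x]).filter (fun p => p.2 == ((j : Int) + 1))
          = l.filter (fun p => p.2 == ((j : Int) + 1)) ++ [x] := by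
        rw [List.filter_append]
        simp [hx]
      have hlow : (pvDesc j).flatMap (fun c => (l ++ [x]).filter (fun p => p.2 == c))
          = (pvDesc j).flatMap (fun c => l.filter (fun p => p.2 == c)) := by
        apply List.flatMap_congr
        intro c hc
        have hcb := pvMem_desc.mp hc
        rw [List.filter_append]
        have : (x.2 == c) = false := by
          simp only [beq_eq_false_iff_ne, ne_eq]
          omega
        simp [this]
      rw [htop, hlow]
      simp
    · have h2' : x.2 ≤ (j : Int) := by push_cast at h2; omega
      rw [ih h2']
      have htop : (l ++ [x]).filter (fun p => p.2 == ((j : Int) + 1))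
          = l.filter (fun p => p.2 == ((j : Int) + 1)) := by
        rw [List.filter_append]
        have : (x.2 == ((j : Int) + 1)) = false := by
          simp only [beq_eq_false_iff_ne, ne_eq]
          omega
        simp [this]
      rw [htop]

theorem pvSorted_buckets (l : List (Char × Int)) (j : Nat)
    (h : ∀ p ∈ l, 1 ≤ p.2 ∧ p.2 ≤ (j : Int)) :
    PySem.List.sorted l (fun p => p.2) true
      = (pvDesc j).flatMap (fun c => l.filter (fun p => p.2 == c)) := by
  rw [PySem.List.sorted_rev_eq_foldl_insertBy]
  induction l using List.reverseRecOn with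
  | nil => simp
  | append_singleton t x ih =>
    rw [List.foldl_append, List.foldl_cons, List.foldl_nil]
    rw [ih (fun p hp => h p (by simp [hp]))]
    have hx := h x (by simp)
    exact pvIns x j t hx.1 hx.2

theorem fun_kth_occurrences_lists (s : String) :
    fun_kth_occurrences s = fun_kth_occurrences_alt s := by
  funext n
  unfold fun_kth_occurrences fun_kth_occurrences_alt
  dsimp only
  set xs := s.toList with hxs
  -- both frequency loops build Counter(xs)
  have hfun : (fun (d : PySem.Dict Char Int) i =>
      if d.contains i then d.insert i (d.getD i 0 + 1) else d.insert i 1)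
      = fun d i => d.insert i (d.getD i 0 + 1) := by
    funext d i
    by_cases hc : d.contains i
    · simp [hc]
    · simp only [Bool.not_eq_true] at hc
      simp [hc, PySem.Dict.getD_of_not_contains d 0 hc]
  rw [hfun, PySem.Dict.foldl_insert_getD_add_one_eq_counter]
  set d := PySem.Dict.counter xs with hd
  -- A's lit is (sorted items).map fst
  have hnodup : ((PySem.List.sorted d.items (fun item => item.2) true).map Prod.fst).Nodup := by
    have hperm : (PySem.List.sorted d.items (fun item => item.2) true).Perm d.items :=
      PySem.List.sorted_perm d.items (fun item => item.2) true
    have : (d.items.map Prod.fst).Nodup := PySem.Dict.nodup_keys_counter xs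
    exact this.perm (hperm.map Prod.fst).symm
  have hitems : ((PySem.List.sorted d.items (fun item => item.2) true).foldl
      (fun acc kv => acc.insert kv.1 kv.2) PySem.Dict.empty).items
      = (PySem.List.sorted d.items (fun item => item.2) true).map (fun kv => (kv.1, kv.2)) := by
    have := PySem.Dict.items_foldl_insert_fresh
      (PySem.List.sorted d.items (fun item => item.2) true)
      (fun kv => kv.1) (fun kv => kv.2) PySem.Dict.empty
      (fun a _ => by simp [PySem.Dict.contains_empty]) (by simpa using hnodup)
    simpa [PySem.Dict.items] using this
  have hlitA : (((PySem.List.sorted d.items (fun item => item.2) true).foldl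
      (fun acc kv => acc.insert kv.1 kv.2) PySem.Dict.empty).keys).foldl
      (fun lit key => lit ++ [key]) []
      = (PySem.List.sorted d.items (fun item => item.2) true).map Prod.fst := by
    rw [PySem.List.foldl_append_singleton_eq_self]
    simp only [PySem.Dict.keys, hitems, List.map_map, List.nil_append]
    rfl
  rw [hlitA]
  -- B's lit: bucket pass
  have hvals : d.values = d.items.map Prod.snd := rfl
  cases hmax : PySem.List.max? d.values (fun v => v) with
  | none =>
    dsimp only
    have : d.values = [] := (PySem.List.max?_eq_none_iff _ _).mp hmax
    have hitems0 : d.items = [] := by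
      have := this
      rw [hvals] at this
      exact List.map_eq_nil_iff.mp this
    simp [hitems0, PySem.List.sorted]
  | some m =>
    dsimp only
    -- every count is in [1, m]
    have hbounds : ∀ p ∈ d.items, 1 ≤ p.2 ∧ p.2 ≤ m := by
      intro p hp
      constructor
      · rw [hd, PySem.Dict.items_counter] at hp
        rcases List.mem_map.mp hp with ⟨k, hk, rfl⟩
        have : k ∈ xs := (PySem.Set.mem_ofList xs k).mp hk
        have : 0 < xs.count k := List.count_pos_iff.mpr this
        simp only []
        omega
      · have : p.2 ∈ d.values := by
          rw [hvals]
          exact List.mem_map.mpr ⟨p, hp, rfl⟩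
        exact PySem.List.max?_isMax hmax p.2 this
    have hm1 : 1 ≤ m := by
      have hmem : m ∈ d.values := PySem.List.max?_mem hmax
      rw [hvals] at hmem
      rcases List.mem_map.mp hmem with ⟨p, hp, rfl⟩
      exact (hbounds p hp).1
    have hm0 : 0 ≤ m := by omega
    have hbounds' : ∀ p ∈ d.items, 1 ≤ p.2 ∧ p.2 ≤ ((m.toNat : Nat) : Int) := by
      intro p hp
      have := hbounds p hp
      omega
    rw [pvRange_eq_desc m hm0, pvSorted_buckets d.items m.toNat hbounds']
    -- B's double loop is the same flatMap, mapped through fst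
    have hinner : (fun (lit : List Char) (c : Int) =>
        d.items.foldl (fun lit kv => if kv.2 == c then lit ++ [kv.1] else lit) lit)
        = fun lit c => lit ++ (d.items.filter (fun kv => kv.2 == c)).map Prod.fst := by
      funext lit c
      exact PySem.List.foldl_append_if (fun kv => kv.2 == c) Prod.fst d.items lit
    rw [hinner, PySem.List.foldl_append_eq_flatMap]
    rw [List.map_flatMap]
    rfl

-- ===== VERDICT (by name: the statement is the Claim_ definition above) =====
theorem fun_kth_occurrences_spec : Claim_equal_fun_kth_occurrences := by
  intro s n _ _
  unfold Spec_fun_kth_occurrences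
  rw [fun_kth_occurrences_lists]
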